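-- pv_equiv track=rewrite | github.com/MichalDudekk/ASD | x2024 - egz1B - kstrong.py | kstrong_worst
-- ===== SOURCE A (Python) =====
-- from math import inf
--
-- def kstrong_worst(T,k):
--     n = len(T)
--     res = -inf
--
--     for i in range(n):
--         for l in range(0,n-i):
--             array = T[i:i+l+1]
--             array.sort()
--             sum_array = sum(array)
--             for j in range(k):
--                 if j >= len(array):
--                     break
--                 if array[j] >= 0:
--                     break
--                 sum_array -= array[j]
--             res = max(res,sum_array)
--     return res
-- ===== SOURCE B (Python) =====
-- from math import inf
--
-- def _insort(negs, x):
--     # insert x into the ascending list negs, after any equal elements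
--     p = 0
--     while p < len(negs) and negs[p] <= x:
--         p += 1
--     return negs[:p] + [x] + negs[p:]
--
-- def kstrong_worst(T, k):
--     res = -inf
--     for i in range(len(T)):
--         s = 0
--         negs = []  # ascending list of the negative elements of the current subarray
--         for x in T[i:]:
--             s += x
--             if x < 0:
--                 negs = _insort(negs, x)
--             penalty = sum(negs[:k]) if k > 0 else 0
--             res = max(res, s - penalty)
--     return res
-- ===== Notes on version B (the rewrite author's own statement) =====
-- stated objective: faster
-- what changed: Instead of extracting, sorting and re-scanning every subarray from scratch, B fixes the left end and extends the subarray rightwards incrementally, maintaining a running sum and an ascending list of the subarray's negative elements by single insertion, so each candidate costs an insertion plus a k-prefix sum instead of a full sort.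
-- outside the precondition, e.g. on kstrong_worst([], 0): A returns -inf, B returns -inf
import Mathlib
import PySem

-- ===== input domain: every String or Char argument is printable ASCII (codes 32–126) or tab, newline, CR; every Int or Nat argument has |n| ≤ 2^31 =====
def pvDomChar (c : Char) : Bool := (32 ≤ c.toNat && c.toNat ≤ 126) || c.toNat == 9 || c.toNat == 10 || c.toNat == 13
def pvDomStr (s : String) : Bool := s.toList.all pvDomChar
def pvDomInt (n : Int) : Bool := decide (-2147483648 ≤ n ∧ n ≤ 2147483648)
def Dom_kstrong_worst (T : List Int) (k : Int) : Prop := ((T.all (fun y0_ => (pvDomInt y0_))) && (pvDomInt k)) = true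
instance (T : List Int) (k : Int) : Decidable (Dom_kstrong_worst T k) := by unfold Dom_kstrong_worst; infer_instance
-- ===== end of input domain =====

-- B replaces A's per-subarray extract-sort-scan by an incremental right extension with a running
-- sum and an insertion-maintained ascending list of the subarray's negatives (objective: faster).

-- Python's -inf accumulator is modelled as 'none'; max(res, v) with that accumulator:
def negInfMax (res : Option Int) (v : Int) : Option Int :=
  match res with
  | none => some v
  | some r => some (max r v)

-- ===== PORT A =====
-- 'for j in range(k): if j >= len(array): break; if array[j] >= 0: break; sum_array -= array[j]'
-- fuel = number of remaining range iterations (k.toNat in total), j = the current index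
def aJLoop (array : List Int) : Nat → Nat → Int → Int
  | 0, _, s => s
  | f + 1, j, s =>
    if (j : Int) ≥ PySem.List.len array then s
    else
      match PySem.List.pyGet? array (j : Int) with
      | none => s
      | some v => if v ≥ 0 then s else aJLoop array f (j + 1) (s - v)

def kstrong_worst (T : List Int) (k : Int) : Int :=
  let n : Int := PySem.List.len T
  let res : Option Int :=
    (PySem.List.pyRange 0 n 1).foldl (fun res i =>
      (PySem.List.pyRange 0 (n - i) 1).foldl (fun res l =>
        let array := PySem.List.sorted (PySem.List.slice T (some i) (some (i + l + 1))) (fun x => x) false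
        let sum_array := array.sum
        let sum_array := aJLoop array k.toNat 0 sum_array
        negInfMax res sum_array) res) none
  -- Python returns -inf (a float, not an int) when T = []: excluded by Pre_
  res.getD 0

-- ===== PORT B =====
-- _insort: insert x into the ascending list negs after any equal elements
def bInsort (negs : List Int) (x : Int) : List Int :=
  let p := (negs.takeWhile (fun y => decide (y ≤ x))).length
  negs.take p ++ x :: negs.drop p

-- one step of B's inner loop; state = (s, negs, res)
def bStep (k : Int) (st : Int × List Int × Option Int) (x : Int) : Int × List Int × Option Int :=
  let s := st.1 + x
  let negs := if x < 0 then bInsort st.2.1 x else st.2.1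
  let penalty := if k > 0 then (PySem.List.slice negs none (some k)).sum else 0
  (s, negs, negInfMax st.2.2 (s - penalty))

def kstrong_worst_alt (T : List Int) (k : Int) : Int :=
  let res : Option Int :=
    (List.range T.length).foldl (fun res (i : Nat) =>
      ((PySem.List.slice T (some (i : Int)) none).foldl (bStep k) (0, [], res)).2.2) none
  res.getD 0

-- ===== PRECONDITION & SPEC =====
-- Pre_ excludes only T = [], on which Python A returns -inf, a float and not an int.
def Pre_kstrong_worst (T : List Int) (k : Int) : Prop := T ≠ []
instance (T : List Int) (k : Int) : Decidable (Pre_kstrong_worst T k) := by unfold Pre_kstrong_worst; infer_instance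
def pvWitness_kstrong_worst : List Int × Int := ([-3, 5, -1], 1)

def Spec_kstrong_worst (T : List Int) (k : Int) (out : Int) : Prop := out = kstrong_worst_alt T k
instance (T : List Int) (k : Int) (out : Int) : Decidable (Spec_kstrong_worst T k out) := by unfold Spec_kstrong_worst; infer_instance

-- ===== CLAIM (what is proved, stated in full; the proofs are below) =====
def Claim_equal_kstrong_worst : Prop := ∀ (T : List Int) (k : Int), Dom_kstrong_worst T k → Pre_kstrong_worst T k → Spec_kstrong_worst T k (kstrong_worst T k)

-- ===== LEMMAS AND PROOFS =====

-- the common specification value: sum of the subarray minus the sum of its k most negative elements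
def sortNeg (arr : List Int) : List Int :=
  (arr.filter (fun x => decide (x < 0))).foldl bInsort []

def gval (k : Int) (arr : List Int) : Int :=
  arr.sum - ((sortNeg arr).take k.toNat).sum

-- bInsort's structural recursion
theorem bInsort_nil (x : Int) : bInsort [] x = [x] := rfl

theorem bInsort_cons (y : Int) (ys : List Int) (x : Int) :
    bInsort (y :: ys) x = if y ≤ x then y :: bInsort ys x else x :: y :: ys := by
  by_cases h : y ≤ x <;> simp [bInsort, h]

theorem bInsort_perm (l : List Int) (x : Int) : (bInsort l x).Perm (x :: l) := by
  induction l with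
  | nil => simp [bInsort_nil]
  | cons y ys ih =>
    rw [bInsort_cons]
    by_cases h : y ≤ x
    · simpa [h] using ((ih.cons y).trans (List.Perm.swap x y ys))
    · simp [h]

theorem bInsort_pairwise (l : List Int) (x : Int) (h : l.Pairwise (· ≤ ·)) :
    (bInsort l x).Pairwise (· ≤ ·) := by
  induction l with
  | nil => simp [bInsort_nil]
  | cons y ys ih =>
    rw [List.pairwise_cons] at h
    rw [bInsort_cons]
    by_cases hyx : y ≤ x
    · rw [if_pos hyx]
      refine List.pairwise_cons.2 ⟨?_, ih h.2⟩
      intro z hz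
      rcases List.mem_cons.1 ((bInsort_perm ys x).mem_iff.1 hz) with rfl | hz
      · exact hyx
      · exact h.1 z hz
    · rw [if_neg hyx]
      refine List.pairwise_cons.2 ⟨?_, List.pairwise_cons.2 ⟨h.1, h.2⟩⟩
      intro z hz
      rcases List.mem_cons.1 hz with rfl | hz
      · omega
      · have := h.1 z hz; omega

theorem insFold_perm (l acc : List Int) : (l.foldl bInsort acc).Perm (acc ++ l) := by
  induction l generalizing acc with
  | nil => simp
  | cons x xs ih =>
    exact (ih _).trans (((bInsort_perm acc x).append_right xs).trans List.perm_middle.symm)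

theorem insFold_pairwise (l acc : List Int) (h : acc.Pairwise (· ≤ ·)) :
    (l.foldl bInsort acc).Pairwise (· ≤ ·) := by
  induction l generalizing acc with
  | nil => simpa using h
  | cons x xs ih => exact ih _ (bInsort_pairwise _ _ h)

theorem sortNeg_perm (arr : List Int) :
    (sortNeg arr).Perm (arr.filter (fun x => decide (x < 0))) := by
  simpa using insFold_perm (arr.filter (fun x => decide (x < 0))) []

theorem sortNeg_pairwise (arr : List Int) : (sortNeg arr).Pairwise (· ≤ ·) :=
  insFold_pairwise _ [] (by simp)

-- A's j-loop subtracts the leading negatives among the first 'fuel' entries from position j on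
theorem aJLoop_spec (arr : List Int) (f : Nat) : ∀ (j : Nat) (s : Int),
    aJLoop arr f j s = s - (((arr.drop j).take f).takeWhile (fun v => decide (v < 0))).sum := by
  induction f with
  | zero => intro j s; simp [aJLoop]
  | succ f ih =>
    intro j s
    by_cases hj : j < arr.length
    · have hget : PySem.List.pyGet? arr (j : Int) = some arr[j] := by
        simp [List.getElem?_eq_getElem hj]
      have hlen : ¬ ((j : Int) ≥ PySem.List.len arr) := by
        simp [PySem.List.len_eq]; exact_mod_cast hj
      have hdrop : arr.drop j = arr[j] :: arr.drop (j + 1) := List.drop_eq_getElem_cons hj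
      rw [hdrop, List.take_succ_cons, List.takeWhile_cons]
      by_cases hv : arr[j] ≥ 0
      · have : ¬ (arr[j] < 0) := by omega
        simp [aJLoop, hlen, hget, hv, this]
      · have hv' : arr[j] < 0 := by omega
        simp only [aJLoop, hget, if_neg hlen, if_neg hv]
        rw [ih (j + 1) (s - arr[j])]
        simp [hv']
        ring
    · have hlen : (j : Int) ≥ PySem.List.len arr := by
        simp [PySem.List.len_eq]; omega
      have hdrop : arr.drop j = [] := List.drop_eq_nil_of_le (by omega)
      simp [aJLoop, hlen, hdrop]
      exact fun h => absurd h hj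

-- on an ascending list the negatives form a prefix
theorem takeWhile_eq_filter_of_pairwise (l : List Int) (h : l.Pairwise (· ≤ ·)) :
    l.takeWhile (fun v => decide (v < 0)) = l.filter (fun v => decide (v < 0)) := by
  induction l with
  | nil => rfl
  | cons x xs ih =>
    rw [List.pairwise_cons] at h
    by_cases hx : x < 0
    · simp [List.takeWhile_cons, hx, ih h.2]
    · have hnil : xs.filter (fun v => decide (v < 0)) = [] := by
        rw [List.filter_eq_nil_iff]
        intro y hy
        have := h.1 y hy
        simp; omega
      simp [List.filter_cons, hx, hnil]

-- the negatives of the sorted subarray, in order, are exactly sortNeg of the subarray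
theorem filter_sorted_eq_sortNeg (arr : List Int) :
    (PySem.List.sorted arr (fun x => x) false).filter (fun v => decide (v < 0)) = sortNeg arr := by
  apply PySem.List.eq_of_perm_of_pairwise_le_of_injective (fun x => x) (fun a b h => h)
  · exact ((PySem.List.sorted_perm arr (fun x => x) false).filter _).trans (sortNeg_perm arr).symm
  · exact (PySem.List.sorted_pairwise arr (fun x => x)).filter _
  · exact sortNeg_pairwise arr

-- A's value for one subarray is gval
theorem aCell_eq_gval (k : Int) (sub : List Int) :
    aJLoop (PySem.List.sorted sub (fun x => x) false) k.toNat 0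
        (PySem.List.sorted sub (fun x => x) false).sum = gval k sub := by
  have hpw : (PySem.List.sorted sub (fun x => x) false).Pairwise (· ≤ ·) := by
    simpa using PySem.List.sorted_pairwise sub (fun x => x)
  rw [aJLoop_spec, List.drop_zero, ← List.take_takeWhile,
    takeWhile_eq_filter_of_pairwise _ hpw, filter_sorted_eq_sortNeg,
    (PySem.List.sorted_perm sub (fun x => x) false).sum_eq]
  rfl

-- B's inner loop invariant
theorem inner_inv (k : Int) (xs : List Int) : ∀ (pre : List Int) (res : Option Int),
    (xs.foldl (bStep k) (pre.sum, sortNeg pre, res)).2.2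
      = (List.range xs.length).foldl
          (fun r t => negInfMax r (gval k (pre ++ xs.take (t + 1)))) res := by
  induction xs with
  | nil => intro pre res; simp
  | cons x xs ih =>
    intro pre res
    have hstep : bStep k (pre.sum, sortNeg pre, res) x
        = ((pre ++ [x]).sum, sortNeg (pre ++ [x]), negInfMax res (gval k (pre ++ [x]))) := by
      have hneg : sortNeg (pre ++ [x]) = if x < 0 then bInsort (sortNeg pre) x else sortNeg pre := by
        unfold sortNeg
        rw [List.filter_append, List.foldl_append]
        by_cases hx : x < 0 <;> simp [hx]
      have hpen : (if k > 0 then (PySem.List.slice (sortNeg (pre ++ [x])) none (some k)).sum else 0)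
          = ((sortNeg (pre ++ [x])).take k.toNat).sum := by
        by_cases hk : k > 0
        · rw [if_pos hk, PySem.List.slice_to _ (le_of_lt hk)]
        · rw [if_neg hk]
          have : k.toNat = 0 := by omega
          simp [this]
      simp only [bStep, hneg.symm]
      rw [hpen]
      simp [gval, List.sum_append]
    rw [List.foldl_cons, hstep, ih (pre ++ [x]) (negInfMax res (gval k (pre ++ [x])))]
    rw [List.length_cons, List.range_succ_eq_map, List.foldl_cons, List.foldl_map]
    simp [List.take_succ_cons, List.append_assoc]

-- ===== VERDICT (by name: the statement is the Claim_ definition above) =====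
-- the two ports agree unconditionally (on [] both options are 'none' and getD yields 0)
theorem ports_eq (T : List Int) (k : Int) : kstrong_worst T k = kstrong_worst_alt T k := by
  simp only [kstrong_worst, kstrong_worst_alt]
  congr 1
  rw [PySem.List.pyRange_one, List.foldl_map]
  have hn : (PySem.List.len T - 0).toNat = T.length := by simp [PySem.List.len_eq]
  rw [hn]
  apply PySem.List.foldl_congr_mem
  intro res i _
  -- inner loop for a fixed left end i
  rw [PySem.List.slice_from_natCast]
  have hinit : ((0 : Int), ([] : List Int), res) = (List.sum [], sortNeg [], res) := by
    simp [sortNeg]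
  rw [hinit, inner_inv k (T.drop i) [] res]
  rw [PySem.List.pyRange_one, List.foldl_map]
  have hlen : ((PySem.List.len T - (0 + (i : Int)) - 0).toNat) = (T.drop i).length := by
    simp [PySem.List.len_eq]
  rw [hlen]
  apply PySem.List.foldl_congr_mem
  intro r l _
  congr 1
  simp only [zero_add]
  have hslice : PySem.List.slice T (some ((i : Nat) : Int)) (some ((i : Int) + (l : Int) + 1))
      = (T.drop i).take (l + 1) := by
    have h2 : ((i : Int) + (l : Int) + 1) = ((i : Nat) : Int) + (((l + 1 : Nat)) : Int) := by
      push_cast; ring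
    rw [h2, PySem.List.slice_natCast_add]
  rw [hslice]
  simpa using aCell_eq_gval k ((T.drop i).take (l + 1))

theorem kstrong_worst_spec : Claim_equal_kstrong_worst := by
  intro T k _ _
  unfold Spec_kstrong_worst
  exact ports_eq T k
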